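-- pv_equiv track=rewrite | github.com/global-tek/packet_sniffers | src/decryption/traffic_decryptor.py | _size_distribution
-- ===== SOURCE A (Python) =====
-- from typing import Dict, List, Any, Optional
--
-- def _size_distribution(sizes: List[int]) -> Dict[str, int]:
--     d = {'tiny': 0, 'small': 0, 'medium': 0, 'large': 0}
--     for s in sizes:
--         if s <= 64:
--             d['tiny'] += 1
--         elif s <= 512:
--             d['small'] += 1
--         elif s <= 1500:
--             d['medium'] += 1
--         else:
--             d['large'] += 1
--     return d
-- ===== SOURCE B (Python) =====
-- from typing import Dict, List
--
--
-- def _size_distribution(sizes: List[int]) -> Dict[str, int]: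
--     # Count each bucket with its own range predicate; 'large' is whatever remains.
--     tiny = sum(1 for s in sizes if s <= 64)
--     small = sum(1 for s in sizes if 64 < s <= 512)
--     medium = sum(1 for s in sizes if 512 < s <= 1500)
--     return {'tiny': tiny, 'small': small, 'medium': medium,
--             'large': len(sizes) - tiny - small - medium}
-- ===== Notes on version B (the rewrite author's own statement) =====
-- stated objective: simpler
-- what changed: A threads a mutable dict through one loop with a four-way branch per element; B instead counts each bucket directly with its own range predicate (three comprehension sums) and derives 'large' as the remainder len(sizes)-tiny-small-medium, building the result dict once at the end.
import Mathlib
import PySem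

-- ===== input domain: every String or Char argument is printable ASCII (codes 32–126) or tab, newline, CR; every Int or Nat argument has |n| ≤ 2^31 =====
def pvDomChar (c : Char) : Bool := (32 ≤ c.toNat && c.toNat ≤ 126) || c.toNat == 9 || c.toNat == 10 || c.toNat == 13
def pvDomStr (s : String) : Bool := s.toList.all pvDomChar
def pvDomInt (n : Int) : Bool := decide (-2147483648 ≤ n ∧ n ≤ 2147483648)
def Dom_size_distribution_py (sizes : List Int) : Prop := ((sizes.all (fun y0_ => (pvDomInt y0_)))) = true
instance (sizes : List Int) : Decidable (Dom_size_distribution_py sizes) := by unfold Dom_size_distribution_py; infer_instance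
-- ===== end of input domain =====

-- B counts each bucket with its own range predicate and derives 'large' as the remainder,
-- instead of A's single loop threading a mutable dict through a four-way branch. Same O(n) cost; simpler decomposition.

-- ===== PORT A =====
-- loop body of A: the four-way branch updating the dict (d['k'] += 1 on an always-present key)
def pvStepA (d : PySem.Dict String Int) (s : Int) : PySem.Dict String Int :=
  if s ≤ 64 then d.modify "tiny" 0 (· + 1)
  else if s ≤ 512 then d.modify "small" 0 (· + 1)
  else if s ≤ 1500 then d.modify "medium" 0 (· + 1)
  else d.modify "large" 0 (· + 1)

def size_distribution_py (sizes : List Int) : List (String × Int) :=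
  (sizes.foldl pvStepA
    ((((PySem.Dict.empty.insert "tiny" 0).insert "small" 0).insert "medium" 0).insert "large" 0)).items

-- ===== PORT B =====
-- B's three bucket predicates (the chained comparisons of Source B's generator filters)
def pvTiny (s : Int) : Bool := decide (s ≤ 64)
def pvSmall (s : Int) : Bool := decide (64 < s) && decide (s ≤ 512)
def pvMedium (s : Int) : Bool := decide (512 < s) && decide (s ≤ 1500)

def size_distribution_py_alt (sizes : List Int) : List (String × Int) :=
  let tiny : Int := sizes.countP pvTiny
  let small : Int := sizes.countP pvSmall
  let medium : Int := sizes.countP pvMedium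
  [("tiny", tiny), ("small", small), ("medium", medium),
   ("large", (sizes.length : Int) - tiny - small - medium)]

-- ===== PRECONDITION & SPEC =====
def Spec_size_distribution_py (sizes : List Int) (out : List (String × Int)) : Prop := out = size_distribution_py_alt sizes
instance (sizes : List Int) (out : List (String × Int)) : Decidable (Spec_size_distribution_py sizes out) := by unfold Spec_size_distribution_py; infer_instance

-- ===== CLAIM (what is proved, stated in full; the proofs are below) =====
def Claim_equal_size_distribution_py : Prop := ∀ (sizes : List Int), Dom_size_distribution_py sizes → Spec_size_distribution_py sizes (size_distribution_py sizes)

-- ===== LEMMAS AND PROOFS =====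

-- the leftover bucket of A, only needed for the proof (B computes it as the remainder)
def pvLarge (s : Int) : Bool := decide (1500 < s)

-- one step of A's loop on the four-key dict, per branch
lemma pvStepA_tiny (a b c d x : Int) (h : x ≤ 64) :
    pvStepA (PySem.Dict.mk [("tiny",a),("small",b),("medium",c),("large",d)]) x
    = PySem.Dict.mk [("tiny",a+1),("small",b),("medium",c),("large",d)] := by
  simp [pvStepA, h, PySem.Dict.modify, PySem.Dict.insert, PySem.Dict.contains,
        PySem.Dict.getD, PySem.Dict.get?]

lemma pvStepA_small (a b c d x : Int) (h1 : ¬ x ≤ 64) (h2 : x ≤ 512) :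
    pvStepA (PySem.Dict.mk [("tiny",a),("small",b),("medium",c),("large",d)]) x
    = PySem.Dict.mk [("tiny",a),("small",b+1),("medium",c),("large",d)] := by
  simp [pvStepA, h1, h2, PySem.Dict.modify, PySem.Dict.insert, PySem.Dict.contains,
        PySem.Dict.getD, PySem.Dict.get?]

lemma pvStepA_medium (a b c d x : Int) (h1 : ¬ x ≤ 64) (h2 : ¬ x ≤ 512) (h3 : x ≤ 1500) :
    pvStepA (PySem.Dict.mk [("tiny",a),("small",b),("medium",c),("large",d)]) x
    = PySem.Dict.mk [("tiny",a),("small",b),("medium",c+1),("large",d)] := by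
  simp [pvStepA, h1, h2, h3, PySem.Dict.modify, PySem.Dict.insert, PySem.Dict.contains,
        PySem.Dict.getD, PySem.Dict.get?]

lemma pvStepA_large (a b c d x : Int) (h1 : ¬ x ≤ 64) (h2 : ¬ x ≤ 512) (h3 : ¬ x ≤ 1500) :
    pvStepA (PySem.Dict.mk [("tiny",a),("small",b),("medium",c),("large",d)]) x
    = PySem.Dict.mk [("tiny",a),("small",b),("medium",c),("large",d+1)] := by
  simp [pvStepA, h1, h2, h3, PySem.Dict.modify, PySem.Dict.insert, PySem.Dict.contains,
        PySem.Dict.getD, PySem.Dict.get?]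

-- invariant of A's loop: the dict stays on the four keys and accumulates the per-bucket counts
lemma pvFoldA_items : ∀ (l : List Int) (a b c d : Int),
    (l.foldl pvStepA (PySem.Dict.mk [("tiny",a),("small",b),("medium",c),("large",d)])).items
    = [("tiny", a + (l.countP pvTiny : Int)),
       ("small", b + (l.countP pvSmall : Int)),
       ("medium", c + (l.countP pvMedium : Int)),
       ("large", d + (l.countP pvLarge : Int))] := by
  intro l
  induction l with
  | nil => intro a b c d; simp
  | cons x xs ih =>
    intro a b c d
    by_cases h1 : x ≤ 64
    · have e1 : pvTiny x = true := by simp [pvTiny]; omega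
      have e2 : pvSmall x = false := by simp [pvSmall]; omega
      have e3 : pvMedium x = false := by simp [pvMedium]; omega
      have e4 : pvLarge x = false := by simp [pvLarge]; omega
      rw [List.foldl_cons, pvStepA_tiny a b c d x h1, ih]
      simp [e1, e2, e3, e4]
      omega
    · by_cases h2 : x ≤ 512
      · have e1 : pvTiny x = false := by simp [pvTiny]; omega
        have e2 : pvSmall x = true := by simp [pvSmall]; omega
        have e3 : pvMedium x = false := by simp [pvMedium]; omega
        have e4 : pvLarge x = false := by simp [pvLarge]; omega
        rw [List.foldl_cons, pvStepA_small a b c d x h1 h2, ih]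
        simp [e1, e2, e3, e4]
        omega
      · by_cases h3 : x ≤ 1500
        · have e1 : pvTiny x = false := by simp [pvTiny]; omega
          have e2 : pvSmall x = false := by simp [pvSmall]; omega
          have e3 : pvMedium x = true := by simp [pvMedium]; omega
          have e4 : pvLarge x = false := by simp [pvLarge]; omega
          rw [List.foldl_cons, pvStepA_medium a b c d x h1 h2 h3, ih]
          simp [e1, e2, e3, e4]
          omega
        · have e1 : pvTiny x = false := by simp [pvTiny]; omega
          have e2 : pvSmall x = false := by simp [pvSmall]; omega
          have e3 : pvMedium x = false := by simp [pvMedium]; omega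
          have e4 : pvLarge x = true := by simp [pvLarge]; omega
          rw [List.foldl_cons, pvStepA_large a b c d x h1 h2 h3, ih]
          simp [e1, e2, e3, e4]
          omega

-- the four bucket predicates partition the list
lemma pvPartition (l : List Int) :
    l.countP pvTiny + l.countP pvSmall + l.countP pvMedium + l.countP pvLarge = l.length := by
  induction l with
  | nil => simp
  | cons x xs ih =>
    simp only [List.countP_cons, List.length_cons, pvTiny, pvSmall, pvMedium, pvLarge,
               Bool.and_eq_true, decide_eq_true_eq]
    split_ifs <;> omega

-- ===== VERDICT (by name: the statement is the Claim_ definition above) =====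
theorem size_distribution_py_spec : Claim_equal_size_distribution_py := by
  intro sizes _
  show size_distribution_py sizes = size_distribution_py_alt sizes
  have h0 : (((PySem.Dict.empty.insert "tiny" (0:Int)).insert "small" 0).insert "medium" 0).insert "large" 0
      = PySem.Dict.mk [("tiny",0),("small",0),("medium",0),("large",0)] := by decide
  have hp := pvPartition sizes
  unfold size_distribution_py size_distribution_py_alt
  rw [h0, pvFoldA_items]
  simp
  omega
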